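-- pv_equiv track=rewrite | github.com/ari-amar/sourcivity | python-backend/spec_comparator.py | extract_all_spec_keys
-- ===== SOURCE A (Python) =====
-- from typing import List, Dict, Set
--
-- def extract_all_spec_keys(scraped_results: List[Dict]) -> List[str]:
--     """
--     Extract all unique specification keys from all results.
--
--     Args:
--         scraped_results: List of scraping results from PDFScraper
--
--     Returns:
--         Sorted list of all unique spec keys
--     """
--     all_keys = set()
--     for result in scraped_results:
--         if result.get("specs") and not result["specs"].get("error"):
--             all_keys.update(result["specs"].keys())
--
--     # Sort keys alphabetically, but put common ones first
--     priority_keys = ["Part Number", "Manufacturer", "part_number", "manufacturer"]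
--     sorted_keys = []
--
--     # Add priority keys first
--     for key in priority_keys:
--         if key in all_keys:
--             sorted_keys.append(key)
--             all_keys.remove(key)
--
--     # Add remaining keys alphabetically
--     sorted_keys.extend(sorted(all_keys))
--
--     return sorted_keys
-- ===== SOURCE B (Python) =====
-- from typing import List, Dict
--
--
-- def extract_all_spec_keys(scraped_results: List[Dict]) -> List[str]:
--     priority_map = {k: i for i, k in enumerate(["Part Number", "Manufacturer", "part_number", "manufacturer"])}
--     all_keys = set()
--     for result in scraped_results:
--         specs = result.get("specs")
--         if specs and not specs.get("error"):
--             all_keys.update(specs.keys())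
--     return sorted(all_keys, key=lambda k: (priority_map.get(k, len(priority_map)), k))
-- ===== Notes on version B (the rewrite author's own statement) =====
-- stated objective: idiomatic
-- what changed: Replaces the manual priority-extraction loop with set mutation by a single keyed sort: a rank map built once gives priority keys their fixed index and all other keys the max rank, so one sorted(...) call with key (rank, name) produces the whole output.
import Mathlib
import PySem

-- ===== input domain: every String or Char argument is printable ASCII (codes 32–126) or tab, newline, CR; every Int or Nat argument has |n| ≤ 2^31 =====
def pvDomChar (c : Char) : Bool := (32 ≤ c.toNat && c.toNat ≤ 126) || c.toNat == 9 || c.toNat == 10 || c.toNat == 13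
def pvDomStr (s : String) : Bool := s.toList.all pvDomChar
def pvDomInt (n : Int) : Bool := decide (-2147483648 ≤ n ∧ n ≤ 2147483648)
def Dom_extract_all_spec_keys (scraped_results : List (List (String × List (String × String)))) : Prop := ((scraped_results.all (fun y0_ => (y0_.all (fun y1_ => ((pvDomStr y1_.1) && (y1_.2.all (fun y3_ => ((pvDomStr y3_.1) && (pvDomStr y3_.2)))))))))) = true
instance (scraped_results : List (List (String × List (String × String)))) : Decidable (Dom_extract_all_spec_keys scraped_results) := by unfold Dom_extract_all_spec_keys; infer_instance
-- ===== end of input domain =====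

-- B replaces A's manual priority-extraction loop (with set mutation) by one keyed sort over a rank map; same output, similar cost (objective: idiomatic).

-- ===== PORT A =====
-- The key-collection loop, identical in A and in B (both Pythons collect all_keys the same way):
-- for result in scraped_results: if result.get("specs") and not result["specs"].get("error"): all_keys.update(result["specs"].keys())
-- (dict truthiness = nonempty items; str truthiness = nonempty string)
def pvGatherKeys (scraped_results : List (List (String × List (String × String)))) : PySem.Set String :=
  scraped_results.foldl (fun all_keys result =>
    match (PySem.Dict.mk result).get? "specs" with
    | none => all_keys
    | some specs =>
      if specs.isEmpty then all_keys
      else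
        match (PySem.Dict.mk specs).get? "error" with
        | some e => if e ≠ "" then all_keys
                    else PySem.Set.update all_keys (PySem.Dict.mk specs).keys
        | none => PySem.Set.update all_keys (PySem.Dict.mk specs).keys)
    PySem.Set.empty

def extract_all_spec_keys (scraped_results : List (List (String × List (String × String)))) : List String :=
  let all_keys := pvGatherKeys scraped_results
  let priority_keys := ["Part Number", "Manufacturer", "part_number", "manufacturer"]
  -- for key in priority_keys: if key in all_keys: sorted_keys.append(key); all_keys.remove(key)
  -- (remove after a positive membership test = discard, exact)
  let p := priority_keys.foldl (fun (p : List String × PySem.Set String) key =>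
      if PySem.Set.contains p.2 key then (p.1 ++ [key], PySem.Set.discard p.2 key) else p)
      ([], all_keys)
  p.1 ++ PySem.List.sorted p.2 (fun x => x) false

-- ===== PORT B =====
def extract_all_spec_keys_alt (scraped_results : List (List (String × List (String × String)))) : List String :=
  let priority_map := PySem.Dict.ofList
    ((PySem.List.enumerate ["Part Number", "Manufacturer", "part_number", "manufacturer"]).map
      (fun p => (p.2, p.1)))
  let all_keys := pvGatherKeys scraped_results
  PySem.List.sorted2 all_keys (fun k => priority_map.getD k (priority_map.size : Int)) (fun k => k) false

-- ===== PRECONDITION & SPEC =====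
def Spec_extract_all_spec_keys (scraped_results : List (List (String × List (String × String)))) (out : List String) : Prop := out = extract_all_spec_keys_alt scraped_results
instance (scraped_results : List (List (String × List (String × String)))) (out : List String) : Decidable (Spec_extract_all_spec_keys scraped_results out) := by unfold Spec_extract_all_spec_keys; infer_instance

-- ===== CLAIM (what is proved, stated in full; the proofs are below) =====
def Claim_equal_extract_all_spec_keys : Prop := ∀ (scraped_results : List (List (String × List (String × String)))), Dom_extract_all_spec_keys scraped_results → Spec_extract_all_spec_keys scraped_results (extract_all_spec_keys scraped_results)

-- ===== LEMMAS AND PROOFS =====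

-- the priority rank B's sort uses, and the literal priority list
def pvPrio : List String := ["Part Number", "Manufacturer", "part_number", "manufacturer"]

def pvRank (k : String) : Int :=
  (PySem.Dict.ofList ((PySem.List.enumerate pvPrio).map (fun p => (p.2, p.1)))).getD k 4

def pvKey (k : String) : Lex (Int × String) := toLex (pvRank k, k)

lemma pvRank_of_not_mem (x : String) (hx : x ∉ pvPrio) : pvRank x = 4 := by
  simp only [pvPrio, List.mem_cons, List.not_mem_nil, or_false, not_or] at hx
  obtain ⟨h1, h2, h3, h4⟩ := hx
  have e1 : ("Part Number" == x) = false := beq_eq_false_iff_ne.mpr (Ne.symm h1)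
  have e2 : ("Manufacturer" == x) = false := beq_eq_false_iff_ne.mpr (Ne.symm h2)
  have e3 : ("part_number" == x) = false := beq_eq_false_iff_ne.mpr (Ne.symm h3)
  have e4 : ("manufacturer" == x) = false := beq_eq_false_iff_ne.mpr (Ne.symm h4)
  simp [pvRank, pvPrio, PySem.Dict.ofList, PySem.Dict.getD, PySem.List.enumerate,
    PySem.Dict.get?, PySem.Dict.update, PySem.Dict.insert, PySem.Dict.empty,
    List.find?, e1, e2, e3, e4]

lemma pvRank_lt_of_mem (x : String) (hx : x ∈ pvPrio) : pvRank x < 4 := by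
  simp only [pvPrio, List.mem_cons, List.not_mem_nil, or_false] at hx
  rcases hx with h | h | h | h <;> subst h <;> decide

-- B's sort with the tuple key IS the sort under the lexicographic order on Int × String
lemma pvSorted2_eq_sorted_lex (xs : List String) (k1 : String → Int) (k2 : String → String) :
    PySem.List.sorted2 xs k1 k2 false
      = PySem.List.sorted xs (fun x => toLex (k1 x, k2 x)) false := by
  rw [PySem.List.sorted_eq_foldl_insertBy]
  show List.foldl (fun acc x => PySem.List.insertBy _ x acc) [] xs = _
  congr 1
  funext acc x
  congr 1
  funext a b
  rcases lt_trichotomy (k1 a) (k1 b) with h | h | h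
  · simp [Prod.Lex.toLex_lt_toLex, h]
  · simp [Prod.Lex.toLex_lt_toLex, h]
  · simp [Prod.Lex.toLex_lt_toLex, h, lt_asymm h, ne_of_gt h]

-- the collected key set has no duplicates
lemma pvGather_nodup (scraped_results : List (List (String × List (String × String)))) :
    (pvGatherKeys scraped_results).Nodup := by
  unfold pvGatherKeys
  suffices h : ∀ (l : List (List (String × List (String × String)))) (s : PySem.Set String),
      s.Nodup → (l.foldl _ s).Nodup by
    exact h scraped_results PySem.Set.empty List.nodup_nil
  intro l
  induction l with
  | nil => intro s hs; exact hs
  | cons r t ih =>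
    intro s hs
    simp only [List.foldl_cons]
    apply ih
    cases (PySem.Dict.mk r).get? "specs" with
    | none => exact hs
    | some specs =>
      by_cases hne : specs.isEmpty
      · simpa [hne] using hs
      · simp only [hne]
        cases (PySem.Dict.mk specs).get? "error" with
        | none => exact PySem.Set.nodup_update _ _ hs
        | some e =>
          by_cases he : e = "" <;> simp [he] <;> [exact PySem.Set.nodup_update _ _ hs; exact hs]

-- characterisation of A's priority-extraction fold
lemma pvPrioFold (prio : List String) (out : List String) (s : PySem.Set String)
    (hp : prio.Nodup) (hs : s.Nodup) :
    prio.foldl (fun (p : List String × PySem.Set String) key =>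
        if PySem.Set.contains p.2 key then (p.1 ++ [key], PySem.Set.discard p.2 key) else p)
      (out, s)
    = (out ++ prio.filter (fun k => decide (k ∈ s)),
       s.filter (fun y => decide (y ∉ prio))) := by
  induction prio generalizing out s with
  | nil => simp
  | cons k t ih =>
    have hkt : k ∉ t := (List.nodup_cons.mp hp).1
    have ht : t.Nodup := (List.nodup_cons.mp hp).2
    by_cases hk : k ∈ s
    · have hc : PySem.Set.contains s k = true := by rw [PySem.Set.contains_iff]; exact hk
      simp only [List.foldl_cons, hc, if_true]
      rw [ih _ _ ht (PySem.Set.nodup_discard s k hs)]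
      simp only [Prod.mk.injEq]
      constructor
      · -- output component
        have hfil : List.filter (fun x => decide (x ∈ PySem.Set.discard s k)) t
             = List.filter (fun x => decide (x ∈ s)) t := by
          apply List.filter_congr
          intro x hx
          have hxk : x ≠ k := fun h => hkt (h ▸ hx)
          simp [PySem.Set.mem_discard, hxk]
        rw [hfil, List.filter_cons]
        simp [hk]
      · -- set component
        show (PySem.Set.discard s k).filter _ = _
        simp only [PySem.Set.discard]
        rw [List.filter_filter]
        apply List.filter_congr
        intro y _
        by_cases hyk : y = k <;> simp [hyk]
    · have hc : PySem.Set.contains s k = false := by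
        rw [← Bool.not_eq_true, PySem.Set.contains_iff]; exact hk
      simp only [List.foldl_cons, hc, Bool.false_eq_true, if_false]
      rw [ih _ _ ht hs]
      simp only [Prod.mk.injEq]
      constructor
      · rw [List.filter_cons]; simp [hk]
      · apply List.filter_congr
        intro y hy
        have hyk : y ≠ k := fun h => hk (h ▸ hy)
        simp [hyk]

lemma pvPrio_nodup : pvPrio.Nodup := by decide

lemma pvPrio_pairwise : pvPrio.Pairwise (fun a b => pvKey a < pvKey b) := by decide

-- the main identity, stated over the collected set
lemma pvMain (s : PySem.Set String) (hs : s.Nodup) :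
    (pvPrio.filter (fun k => decide (k ∈ s)))
      ++ PySem.List.sorted (s.filter (fun y => decide (y ∉ pvPrio))) (fun x => x) false
    = PySem.List.sorted s pvKey false := by
  set rest := s.filter (fun y => decide (y ∉ pvPrio)) with hrest
  have hrest_nodup : rest.Nodup := hs.filter _
  have hsorted_nodup : (PySem.List.sorted rest (fun x => x) false).Nodup :=
    (PySem.List.sorted_perm rest (fun x => x) false).symm.nodup hrest_nodup
  have hmem_sorted : ∀ {y}, y ∈ PySem.List.sorted rest (fun x => x) false → y ∈ s ∧ y ∉ pvPrio := by
    intro y hy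
    rw [PySem.List.mem_sorted] at hy
    have := (List.mem_filter.mp hy).2
    exact ⟨(List.mem_filter.mp hy).1, by simpa using this⟩
  symm
  apply PySem.List.sorted_eq_of_perm_of_pairwise_lt
  · -- permutation with s
    have h1 : (PySem.List.sorted rest (fun x => x) false).Perm rest :=
      PySem.List.sorted_perm _ _ _
    refine ((List.perm_ext_iff_of_nodup ?_ hs).mpr ?_)
    · refine List.Nodup.append (pvPrio_nodup.filter _) hsorted_nodup ?_
      intro a ha hb
      exact (hmem_sorted hb).2 (List.mem_of_mem_filter ha)
    · intro a
      constructor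
      · intro ha
        rcases List.mem_append.mp ha with h | h
        · exact of_decide_eq_true (List.mem_filter.mp h).2
        · exact (hmem_sorted h).1
      · intro ha
        by_cases hp : a ∈ pvPrio
        · exact List.mem_append.mpr (Or.inl (List.mem_filter.mpr ⟨hp, by simpa using ha⟩))
        · refine List.mem_append.mpr (Or.inr ?_)
          rw [PySem.List.mem_sorted, hrest]
          exact List.mem_filter.mpr ⟨ha, by simpa using hp⟩
  · -- strictly increasing under pvKey
    rw [List.pairwise_append]
    refine ⟨pvPrio_pairwise.filter _, ?_, ?_⟩
    · -- tail: identity-sorted distinct strings of rank 4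
      have hle : (PySem.List.sorted rest (fun x => x) false).Pairwise (fun a b => a ≤ b) :=
        PySem.List.sorted_pairwise rest (fun x => x)
      have hlt : (PySem.List.sorted rest (fun x => x) false).Pairwise (fun a b => a < b) := by
        have := hle.and hsorted_nodup
        exact this.imp (fun h => lt_of_le_of_ne h.1 h.2)
      refine hlt.imp_of_mem ?_
      intro a b ha hb hab
      have hra : pvRank a = 4 := pvRank_of_not_mem a (hmem_sorted ha).2
      have hrb : pvRank b = 4 := pvRank_of_not_mem b (hmem_sorted hb).2
      exact Prod.Lex.toLex_lt_toLex.mpr (Or.inr ⟨by rw [hra, hrb], hab⟩)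
    · -- cross pairs: priority ranks < 4 ≤ rank of the rest
      intro a ha b hb
      have hra : pvRank a < 4 := pvRank_lt_of_mem a (List.mem_of_mem_filter ha)
      have hrb : pvRank b = 4 := pvRank_of_not_mem b (hmem_sorted hb).2
      exact Prod.Lex.toLex_lt_toLex.mpr (Or.inl (by rw [hrb]; exact hra))

-- ===== VERDICT (by name: the statement is the Claim_ definition above) =====
theorem extract_all_spec_keys_spec : Claim_equal_extract_all_spec_keys := by
  intro scraped_results _
  show extract_all_spec_keys scraped_results = extract_all_spec_keys_alt scraped_results
  unfold extract_all_spec_keys extract_all_spec_keys_alt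
  dsimp only
  rw [show ["Part Number", "Manufacturer", "part_number", "manufacturer"] = pvPrio from rfl]
  set s := pvGatherKeys scraped_results
  have hs : s.Nodup := pvGather_nodup scraped_results
  rw [pvPrioFold pvPrio [] s pvPrio_nodup hs, pvSorted2_eq_sorted_lex]
  dsimp only
  rw [show (fun k => toLex ((PySem.Dict.ofList ((PySem.List.enumerate pvPrio).map (fun p => (p.2, p.1)))).getD k ((PySem.Dict.ofList ((PySem.List.enumerate pvPrio).map (fun p => (p.2, p.1)))).size : Int), k)) = pvKey from rfl]
  simpa using pvMain s hs
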